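-- pv_equiv track=rewrite | github.com/layup/compound_reports | Post_Generate/pesticidesReport.py | generateSampleSectionNames
-- ===== SOURCE A (Python) =====
-- def generateSampleSectionNames(samples, sampleNames):
--     currentWord = ''
--     headerNames = []
--
--     for i, sample in enumerate(samples, 1):
--
--         if sample in sampleNames:
--             currentWord += str(i) + ") " +  sampleNames[sample].strip() + " "
--         else:
--             currentWord += str(i) + ")" + sample + ' '
--
--         if(i % 4 == 0):
--             headerNames.append(currentWord)
--             currentWord = ''
--
--     if(currentWord != ''):
--         headerNames.append(currentWord)
--
--     return headerNames;
-- ===== SOURCE B (Python) =====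
-- def generateSampleSectionNames(samples, sampleNames):
--     tokens = []
--     for i, sample in enumerate(samples, 1):
--         if sample in sampleNames:
--             tokens.append(str(i) + ") " + sampleNames[sample].strip() + " ")
--         else:
--             tokens.append(str(i) + ")" + sample + ' ')
--     return [''.join(tokens[j:j+4]) for j in range(0, len(tokens), 4)]
-- ===== Notes on version B (the rewrite author's own statement) =====
-- stated objective: simpler
-- what changed: Replaces the single inline pass that accumulates a running string and flushes it on every fourth index with two separate phases: first format all numbered tokens into a flat list, then chunk that list into groups of four and join each group.
import Mathlib
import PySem

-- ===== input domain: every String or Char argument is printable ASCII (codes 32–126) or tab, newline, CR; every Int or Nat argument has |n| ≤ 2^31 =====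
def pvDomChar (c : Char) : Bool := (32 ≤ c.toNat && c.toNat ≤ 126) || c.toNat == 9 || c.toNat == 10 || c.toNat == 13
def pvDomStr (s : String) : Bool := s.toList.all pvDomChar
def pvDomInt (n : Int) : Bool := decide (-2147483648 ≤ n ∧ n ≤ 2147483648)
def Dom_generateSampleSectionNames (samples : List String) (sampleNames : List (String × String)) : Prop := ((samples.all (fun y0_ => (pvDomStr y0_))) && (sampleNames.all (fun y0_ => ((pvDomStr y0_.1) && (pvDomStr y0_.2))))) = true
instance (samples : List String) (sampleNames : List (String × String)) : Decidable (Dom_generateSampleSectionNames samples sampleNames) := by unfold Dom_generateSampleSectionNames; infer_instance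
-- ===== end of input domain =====

-- B replaces A's single inline pass (running string flushed at every 4th index) by two phases:
-- format all numbered tokens into a flat list, then chunk it into groups of four and join each (objective: simpler).


-- ===== PORT A =====
def generateSampleSectionNames (samples : List String) (sampleNames : List (String × String)) : List String :=
  let st := (PySem.List.enumerate samples 1).foldl
    (fun (s : String × List String) p =>
      let cw :=
        match (PySem.Dict.mk sampleNames).get? p.2 with
        | some v => s.1 ++ PySem.Int.toStr p.1 ++ ") " ++ PySem.Str.strip v ++ " "
        | none   => s.1 ++ PySem.Int.toStr p.1 ++ ")" ++ p.2 ++ " "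
      if PySem.Int.mod p.1 4 = 0 then ("", s.2 ++ [cw]) else (cw, s.2))
    ("", [])
  if st.1 ≠ "" then st.2 ++ [st.1] else st.2

-- ===== PORT B =====
def generateSampleSectionNames_alt (samples : List String) (sampleNames : List (String × String)) : List String :=
  let tokens := (PySem.List.enumerate samples 1).map
    (fun p =>
      match (PySem.Dict.mk sampleNames).get? p.2 with
      | some v => PySem.Int.toStr p.1 ++ ") " ++ PySem.Str.strip v ++ " "
      | none   => PySem.Int.toStr p.1 ++ ")" ++ p.2 ++ " ")
  (PySem.List.pyRange 0 (PySem.List.len tokens) 4).map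
    (fun j => PySem.Str.join "" (PySem.List.slice tokens (some j) (some (j + 4))))

-- ===== PRECONDITION & SPEC =====
def Spec_generateSampleSectionNames (samples : List String) (sampleNames : List (String × String)) (out : List String) : Prop := out = generateSampleSectionNames_alt samples sampleNames
instance (samples : List String) (sampleNames : List (String × String)) (out : List String) : Decidable (Spec_generateSampleSectionNames samples sampleNames out) := by unfold Spec_generateSampleSectionNames; infer_instance

-- ===== CLAIM (what is proved, stated in full; the proofs are below) =====
def Claim_equal_generateSampleSectionNames : Prop := ∀ (samples : List String) (sampleNames : List (String × String)), Dom_generateSampleSectionNames samples sampleNames → Spec_generateSampleSectionNames samples sampleNames (generateSampleSectionNames samples sampleNames)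

-- ===== LEMMAS AND PROOFS =====

def pvTok (sampleNames : List (String × String)) (p : Int × String) : String :=
  match (PySem.Dict.mk sampleNames).get? p.2 with
  | some v => PySem.Int.toStr p.1 ++ ") " ++ PySem.Str.strip v ++ " "
  | none   => PySem.Int.toStr p.1 ++ ")" ++ p.2 ++ " "

def pvStep (sampleNames : List (String × String)) (s : String × List String) (p : Int × String) : String × List String :=
  let cw :=
    match (PySem.Dict.mk sampleNames).get? p.2 with
    | some v => s.1 ++ PySem.Int.toStr p.1 ++ ") " ++ PySem.Str.strip v ++ " "
    | none   => s.1 ++ PySem.Int.toStr p.1 ++ ")" ++ p.2 ++ " "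
  if PySem.Int.mod p.1 4 = 0 then ("", s.2 ++ [cw]) else (cw, s.2)

def pvFinish (st : String × List String) : List String :=
  if st.1 ≠ "" then st.2 ++ [st.1] else st.2

def pvChunk : List String → List String
  | [] => []
  | t :: ts => PySem.Str.join "" ((t :: ts).take 4) :: pvChunk ((t :: ts).drop 4)
termination_by ts => ts.length
decreasing_by simp

theorem pvStr_ext {s t : String} (h : s.toList = t.toList) : s = t := String.toList_inj.mp h

theorem pvCharsJoin (css : List (List Char)) : PySem.Chars.join [] css = css.flatten := by
  induction css with
  | nil => simp [PySem.Chars.join_nil]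
  | cons a t ih =>
    cases t with
    | nil => simp [PySem.Chars.join_singleton]
    | cons b r =>
      rw [PySem.Chars.join_cons_cons]
      simp [ih]

theorem pvTok_toList_ne_nil (sn : List (String × String)) (p : Int × String) :
    (pvTok sn p).toList ≠ [] := by
  unfold pvTok
  cases (PySem.Dict.mk sn).get? p.2 <;> simp

theorem pvStep_eq (sn : List (String × String)) (s : String × List String) (p : Int × String) :
    pvStep sn s p = if PySem.Int.mod p.1 4 = 0 then ("", s.2 ++ [s.1 ++ pvTok sn p])
                    else (s.1 ++ pvTok sn p, s.2) := by
  cases h : (PySem.Dict.mk sn).get? p.2 <;> simp [pvStep, pvTok, h, String.append_assoc]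

theorem pvAppend_ne (x t : String) (h : t.toList ≠ []) : x ++ t ≠ "" := by
  intro he
  apply h
  have := congrArg String.toList he
  simp at this
  rw [this.2]
  rfl

theorem pvMod_ne (q : Nat) (k : Int) (h1 : 1 ≤ k) (h2 : k ≤ 3) :
    ¬ PySem.Int.mod (4 * (q : Int) + k) 4 = 0 := by
  rw [PySem.Int.mod_eq_zero_iff_dvd]
  omega

theorem pvChunk_small (ts : List String) (h1 : ts ≠ []) (h2 : ts.length ≤ 4) :
    pvChunk ts = [PySem.Str.join "" ts] := by
  cases ts with
  | nil => exact absurd rfl h1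
  | cons t r =>
    rw [pvChunk, List.take_of_length_le h2, List.drop_eq_nil_of_le h2]
    rw [show pvChunk [] = [] from by rw [pvChunk]]

theorem pvA_core (sn : List (String × String)) :
    ∀ (n : Nat) (samples : List String) (q : Nat) (acc : List String), samples.length ≤ n →
    pvFinish ((PySem.List.enumerate samples (4 * (q : Int) + 1)).foldl (pvStep sn) ("", acc))
      = acc ++ pvChunk ((PySem.List.enumerate samples (4 * (q : Int) + 1)).map (pvTok sn)) := by
  intro n
  induction n with
  | zero =>
    intro samples q acc h
    have : samples = [] := List.eq_nil_of_length_eq_zero (Nat.le_zero.mp h)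
    subst this
    simp [PySem.List.enumerate_nil, pvFinish, pvChunk]
  | succ n ih =>
    intro samples q acc h
    match samples with
    | [] => simp [PySem.List.enumerate_nil, pvFinish, pvChunk]
    | [a] =>
      simp only [PySem.List.enumerate_cons, PySem.List.enumerate_nil, List.foldl_cons,
        List.foldl_nil, List.map_cons, List.map_nil, pvStep_eq]
      rw [if_neg (pvMod_ne q 1 (by norm_num) (by norm_num))]
      rw [pvChunk_small _ (by simp) (by simp)]
      simp only [pvFinish]
      rw [if_pos (pvAppend_ne _ _ (pvTok_toList_ne_nil sn _))]
      congr 1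
      simp only [List.cons.injEq, and_true]
      exact pvStr_ext (by simp)
    | [a, b] =>
      simp only [PySem.List.enumerate_cons, PySem.List.enumerate_nil, List.foldl_cons,
        List.foldl_nil, List.map_cons, List.map_nil, pvStep_eq]
      rw [if_neg (pvMod_ne q 1 (by norm_num) (by norm_num))]
      rw [if_neg (show ¬ PySem.Int.mod (4*(q:Int)+1+1) 4 = 0 by rw [PySem.Int.mod_eq_zero_iff_dvd]; omega)]
      rw [pvChunk_small _ (by simp) (by simp)]
      simp only [pvFinish]
      rw [if_pos (pvAppend_ne _ _ (pvTok_toList_ne_nil sn _))]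
      congr 1
      simp only [List.cons.injEq, and_true]
      exact pvStr_ext (by simp [pvCharsJoin])
    | [a, b, c] =>
      simp only [PySem.List.enumerate_cons, PySem.List.enumerate_nil, List.foldl_cons,
        List.foldl_nil, List.map_cons, List.map_nil, pvStep_eq]
      rw [if_neg (pvMod_ne q 1 (by norm_num) (by norm_num))]
      rw [if_neg (show ¬ PySem.Int.mod (4*(q:Int)+1+1) 4 = 0 by rw [PySem.Int.mod_eq_zero_iff_dvd]; omega)]
      rw [if_neg (show ¬ PySem.Int.mod (4*(q:Int)+1+1+1) 4 = 0 by rw [PySem.Int.mod_eq_zero_iff_dvd]; omega)]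
      rw [pvChunk_small _ (by simp) (by simp)]
      simp only [pvFinish]
      rw [if_pos (pvAppend_ne _ _ (pvTok_toList_ne_nil sn _))]
      congr 1
      simp only [List.cons.injEq, and_true]
      exact pvStr_ext (by simp [pvCharsJoin])
    | a :: b :: c :: d :: rest =>
      simp only [PySem.List.enumerate_cons, List.foldl_cons, List.map_cons, pvStep_eq]
      rw [if_neg (pvMod_ne q 1 (by norm_num) (by norm_num))]
      rw [if_neg (show ¬ PySem.Int.mod (4*(q:Int)+1+1) 4 = 0 by rw [PySem.Int.mod_eq_zero_iff_dvd]; omega)]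
      rw [if_neg (show ¬ PySem.Int.mod (4*(q:Int)+1+1+1) 4 = 0 by rw [PySem.Int.mod_eq_zero_iff_dvd]; omega)]
      rw [if_pos (show PySem.Int.mod (4*(q:Int)+1+1+1+1) 4 = 0 by rw [PySem.Int.mod_eq_zero_iff_dvd]; omega)]
      dsimp only
      rw [show (4*(q:Int)+1+1+1+1+1) = 4*(((q+1 : Nat)) : Int)+1 by push_cast; ring]
      rw [ih rest (q+1) _ (by simp at h; omega)]
      rw [pvChunk]
      simp only [List.take_succ_cons, List.take_zero, List.drop_succ_cons, List.drop_zero]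
      rw [List.append_assoc, List.singleton_append]
      congr 2
      exact pvStr_ext (by simp [pvCharsJoin])

theorem pvB_core :
    ∀ (n : Nat) (ts : List String), ts.length ≤ n →
    (PySem.List.pyRange 0 (PySem.List.len ts) 4).map
        (fun j => PySem.Str.join "" (PySem.List.slice ts (some j) (some (j + 4))))
      = pvChunk ts := by
  intro n
  induction n with
  | zero =>
    intro ts h
    have : ts = [] := List.eq_nil_of_length_eq_zero (Nat.le_zero.mp h)
    subst this
    simp [PySem.List.pyRange_of_pos (0:Int) 0 (by norm_num : (0:Int) < 4), pvChunk]
  | succ n ih =>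
    intro ts h
    cases ts with
    | nil => simp [PySem.List.pyRange_of_pos (0:Int) 0 (by norm_num : (0:Int) < 4), pvChunk]
    | cons t r =>
      rw [pvChunk]
      rw [PySem.List.pyRange_of_pos 0 (PySem.List.len (t :: r)) (by norm_num : (0:Int) < 4)]
      have hpos : (0:Int) < PySem.List.len (t :: r) := by simp
      rw [if_pos hpos]
      have hm : ((PySem.List.len (t :: r) - 0 + 4 - 1) / 4).toNat
          = ((PySem.List.len (t :: r) - 1) / 4).toNat + 1 := by
        simp only [PySem.List.len_eq] at *
        omega
      rw [hm, List.range_succ_eq_map, List.map_cons, List.map_map, List.map_cons]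
      congr 1
      · -- head: slice ts 0 4 = take 4
        norm_num
        rw [show PySem.List.slice (t :: r) none (some 4) = (t :: r).take ((4:Int)).toNat from
          PySem.List.slice_to _ (by norm_num)]
        rw [show ((4:Int)).toNat = 4 from rfl]
        simp [List.take_succ_cons]
      · -- tail
        have ihr := ih (List.drop 4 (t :: r)) (by simp at h ⊢; omega)
        rw [PySem.List.pyRange_of_pos 0 (PySem.List.len (List.drop 4 (t :: r))) (by norm_num : (0:Int) < 4)] at ihr
        rw [← ihr]
        rw [List.map_map]
        have hM : (if 0 < PySem.List.len (List.drop 4 (t :: r))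
            then ((PySem.List.len (List.drop 4 (t :: r)) - 0 + 4 - 1) / 4).toNat else 0)
            = ((PySem.List.len (t :: r) - 1) / 4).toNat := by
          simp only [PySem.List.len_eq, List.length_drop, List.length_cons]
          split_ifs with hc <;> omega
        rw [hM, List.map_map]
        apply List.map_congr_left
        intro k hk
        simp only [Function.comp_apply, Nat.succ_eq_add_one, Nat.cast_add, Nat.cast_one]
        congr 1
        have e1 : PySem.List.slice (t :: r) (some (0 + 4 * ((k:Int) + 1))) (some (0 + 4 * ((k:Int) + 1) + 4))
            = ((t :: r).drop (4*k+4)).take 4 := by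
          rw [show (0 + 4 * ((k:Int) + 1)) = ((4*k+4 : Nat) : Int) by push_cast; ring,
              show (((4*k+4 : Nat) : Int) + 4) = ((4*k+8 : Nat) : Int) by push_cast; ring,
              PySem.List.slice_natCast]
          congr 1
          omega
        have e2 : PySem.List.slice (List.drop 4 (t :: r)) (some (0 + 4 * (k:Int))) (some (0 + 4 * (k:Int) + 4))
            = ((t :: r).drop (4*k+4)).take 4 := by
          rw [show (0 + 4 * (k:Int)) = ((4*k : Nat) : Int) by push_cast; ring,
              show (((4*k : Nat) : Int) + 4) = ((4*k+4 : Nat) : Int) by push_cast; ring,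
              PySem.List.slice_natCast,List.drop_drop, Nat.add_comm 4 (4*k)]
          congr 1
          omega
        rw [e1, e2]

-- ===== VERDICT (by name: the statement is the Claim_ definition above) =====
theorem generateSampleSectionNames_spec : Claim_equal_generateSampleSectionNames := by
  intro samples sampleNames _
  unfold Spec_generateSampleSectionNames generateSampleSectionNames generateSampleSectionNames_alt
  have hA := pvA_core sampleNames samples.length samples 0 [] (le_refl _)
  have hB := pvB_core ((PySem.List.enumerate samples 1).map (pvTok sampleNames)).length
      ((PySem.List.enumerate samples 1).map (pvTok sampleNames)) (le_refl _)
  simp only [Nat.cast_zero, mul_zero, zero_add] at hA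
  rw [show ((fun (s : String × List String) p =>
      let cw :=
        match (PySem.Dict.mk sampleNames).get? p.2 with
        | some v => s.1 ++ PySem.Int.toStr p.1 ++ ") " ++ PySem.Str.strip v ++ " "
        | none   => s.1 ++ PySem.Int.toStr p.1 ++ ")" ++ p.2 ++ " "
      if PySem.Int.mod p.1 4 = 0 then ("", s.2 ++ [cw]) else (cw, s.2)) = pvStep sampleNames) from rfl]
  rw [show ((fun (p : Int × String) =>
      match (PySem.Dict.mk sampleNames).get? p.2 with
      | some v => PySem.Int.toStr p.1 ++ ") " ++ PySem.Str.strip v ++ " "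
      | none   => PySem.Int.toStr p.1 ++ ")" ++ p.2 ++ " ") = pvTok sampleNames) from rfl]
  rw [show (pvFinish ((PySem.List.enumerate samples 1).foldl (pvStep sampleNames) ("", [])))
      = (if ((PySem.List.enumerate samples 1).foldl (pvStep sampleNames) ("", [])).1 ≠ ""
         then ((PySem.List.enumerate samples 1).foldl (pvStep sampleNames) ("", [])).2
              ++ [((PySem.List.enumerate samples 1).foldl (pvStep sampleNames) ("", [])).1]
         else ((PySem.List.enumerate samples 1).foldl (pvStep sampleNames) ("", [])).2) from rfl] at hA
  rw [hA, hB]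
  simp
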